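-- pv_equiv track=rewrite | github.com/Wenbo-J/Mini-Search-Engine | backend/search/search.py | merge_boolean_and_free
-- ===== SOURCE A (Python) =====
-- def merge_boolean_and_free(boolean_ids, free_ids, B=500, T=500):
--     # EXPERIMENT: "Fallback" to free-text if boolean retrieves NONE or TOO LITTLE docs, but keep the boolean essence on top (merging the two)
--     # basically if boolean not enough, fill with top free-text docs (no dupes)
--
--     top_bool = boolean_ids[:B]
--
--     # if we have enough boolean results, just return those
--     if len(top_bool) >= T:
--         return top_bool
--
--     # Otherwise, fill in with free-text results (avoiding duplicates)
--     merged = list(top_bool)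
--     seen = set(merged)
--
--     for d in free_ids:
--         if d not in seen:
--             merged.append(d)
--             seen.add(d)
--             if len(merged) >= T:
--                 break
--
--     return merged
-- ===== SOURCE B (Python) =====
-- def merge_boolean_and_free(boolean_ids, free_ids, B=500, T=500):
--     top_bool = boolean_ids[:B]
--     if len(top_bool) >= T:
--         return top_bool
--     seen = set(top_bool)
--     unique_free = [d for d in dict.fromkeys(free_ids) if d not in seen]
--     return list(top_bool) + unique_free[:T - len(top_bool)]
-- ===== Notes on version B (the rewrite author's own statement) =====
-- stated objective: simpler
-- what changed: Replaces the incremental append-and-break loop with running set mutation by a one-shot pipeline: dedup free_ids (dict.fromkeys), filter out boolean hits, slice to the T - len(top_bool) still needed, and concatenate.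
import Mathlib
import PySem

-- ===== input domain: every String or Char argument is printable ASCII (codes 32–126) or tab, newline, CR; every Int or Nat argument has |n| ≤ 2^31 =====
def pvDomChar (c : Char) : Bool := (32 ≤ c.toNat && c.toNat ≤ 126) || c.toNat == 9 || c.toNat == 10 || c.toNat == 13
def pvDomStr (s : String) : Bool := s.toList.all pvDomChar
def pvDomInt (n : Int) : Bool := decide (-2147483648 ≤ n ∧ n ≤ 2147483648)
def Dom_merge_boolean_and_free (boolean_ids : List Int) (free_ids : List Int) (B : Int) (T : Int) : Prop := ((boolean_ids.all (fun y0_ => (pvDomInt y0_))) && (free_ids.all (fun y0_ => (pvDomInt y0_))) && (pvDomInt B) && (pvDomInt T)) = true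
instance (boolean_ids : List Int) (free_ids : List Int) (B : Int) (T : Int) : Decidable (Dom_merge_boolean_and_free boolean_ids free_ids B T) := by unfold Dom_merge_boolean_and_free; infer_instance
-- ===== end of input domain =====

-- B replaces A's incremental append-and-break fill loop by a one-shot dedup-filter-slice pipeline; objective: simpler.


-- ===== PORT A =====
-- A's fill loop: for d in free_ids: if d not in seen: append; add; if len(merged) >= T: break
def mergeLoopA (T : Int) : List Int → List Int → PySem.Set Int → List Int
  | [], merged, _ => merged
  | d :: rest, merged, seen =>
    if PySem.Set.contains seen d then
      mergeLoopA T rest merged seen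
    else
      if T ≤ ((merged ++ [d]).length : Int) then merged ++ [d]
      else mergeLoopA T rest (merged ++ [d]) (PySem.Set.add seen d)

def merge_boolean_and_free (boolean_ids : List Int) (free_ids : List Int) (B : Int) (T : Int) : List Int :=
  let top_bool := PySem.List.slice boolean_ids none (some B)
  if T ≤ (top_bool.length : Int) then top_bool
  else mergeLoopA T free_ids top_bool (PySem.Set.ofList top_bool)

-- ===== PORT B =====
def merge_boolean_and_free_alt (boolean_ids : List Int) (free_ids : List Int) (B : Int) (T : Int) : List Int :=
  let top_bool := PySem.List.slice boolean_ids none (some B)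
  if T ≤ (top_bool.length : Int) then top_bool
  else
    let seen : PySem.Set Int := PySem.Set.ofList top_bool
    let unique_free := (PySem.List.dedup free_ids).filter (fun d => !(PySem.Set.contains seen d))
    top_bool ++ PySem.List.slice unique_free none (some (T - (top_bool.length : Int)))

-- ===== PRECONDITION & SPEC =====
def Spec_merge_boolean_and_free (boolean_ids : List Int) (free_ids : List Int) (B : Int) (T : Int) (out : List Int) : Prop := out = merge_boolean_and_free_alt boolean_ids free_ids B T
instance (boolean_ids : List Int) (free_ids : List Int) (B : Int) (T : Int) (out : List Int) : Decidable (Spec_merge_boolean_and_free boolean_ids free_ids B T out) := by unfold Spec_merge_boolean_and_free; infer_instance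

-- ===== CLAIM (what is proved, stated in full; the proofs are below) =====
def Claim_equal_merge_boolean_and_free : Prop := ∀ (boolean_ids : List Int) (free_ids : List Int) (B : Int) (T : Int), Dom_merge_boolean_and_free boolean_ids free_ids B T → Spec_merge_boolean_and_free boolean_ids free_ids B T (merge_boolean_and_free boolean_ids free_ids B T)

-- ===== LEMMAS AND PROOFS =====

-- dedup-against-a-membership-predicate: the common normal form both sides reduce to
def gmFilter (m : Int → Bool) : List Int → List Int
  | [] => []
  | d :: r => if m d then gmFilter m r else d :: gmFilter (fun x => m x || x == d) r

theorem gmFilter_congr (m m' : Int → Bool) (h : ∀ x, m x = m' x) (l : List Int) :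
    gmFilter m l = gmFilter m' l := by
  have : m = m' := funext h
  rw [this]

-- A's loop = append what gmFilter keeps, truncated to the T - |merged| still needed
theorem mergeLoopA_eq (T : Int) (free : List Int) :
    ∀ (merged : List Int) (seen : PySem.Set Int),
      (merged.length : Int) < T →
      mergeLoopA T free merged seen =
        merged ++ (gmFilter (fun x => PySem.Set.contains seen x) free).take (T - merged.length).toNat := by
  induction free with
  | nil => intro merged seen _; simp [mergeLoopA, gmFilter]
  | cons d rest ih =>
    intro merged seen hlen
    by_cases hc : PySem.Set.contains seen d
    · simp only [mergeLoopA, gmFilter, hc, if_true]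
      exact ih merged seen hlen
    · simp only [mergeLoopA, gmFilter, hc, Bool.false_eq_true, if_false]
      by_cases hT : T ≤ ((merged ++ [d]).length : Int)
      · simp only [hT, if_true]
        have h1 : (T - (merged.length : Int)).toNat = 1 := by
          simp only [List.length_append, List.length_cons, List.length_nil] at hT
          omega
        simp [h1]
      · simp only [hT, if_false]
        have hlen' : (((merged ++ [d]).length : Int)) < T := by omega
        rw [ih (merged ++ [d]) (PySem.Set.add seen d) hlen']
        have hfun : ∀ x, PySem.Set.contains (PySem.Set.add seen d) x = (PySem.Set.contains seen x || x == d) := by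
          intro x
          simp only [PySem.Set.contains_eq_listContains]
          by_cases hx : x = d
          · subst hx
            simp [PySem.Set.add_eq_ite]
            split_ifs with hm <;> simp [hm]
          · simp [PySem.Set.add_eq_ite, hx]
            split_ifs with hm <;> simp [List.contains_eq_mem, hx]
        rw [gmFilter_congr _ _ hfun rest]
        have hsucc : (T - (merged.length : Int)).toNat =
            (T - ((merged ++ [d]).length : Int)).toNat + 1 := by
          simp only [List.length_append, List.length_cons, List.length_nil]
          simp only [List.length_append, List.length_cons, List.length_nil] at hlen'
          omega
        rw [hsucc, List.take_succ_cons, List.append_assoc, List.singleton_append]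

-- set-building foldl = append the gmFilter of what is new
theorem foldl_add_eq_gmFilter (free : List Int) :
    ∀ (s : List Int),
      free.foldl PySem.Set.add s = s ++ gmFilter (fun x => s.contains x) free := by
  induction free with
  | nil => intro s; simp [gmFilter]
  | cons d rest ih =>
    intro s
    simp only [List.foldl_cons, gmFilter]
    by_cases hc : s.contains d = true
    · rw [if_pos hc]
      have hadd : PySem.Set.add s d = s := by
        simp [PySem.Set.add_eq_ite, List.contains_eq_mem] at hc ⊢
        simp [hc]
      rw [hadd, ih s]
    · rw [if_neg hc]
      have hadd : PySem.Set.add s d = s ++ [d] := by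
        simp [PySem.Set.add_eq_ite, List.contains_eq_mem] at hc ⊢
        simp [hc]
      rw [hadd, ih (s ++ [d])]
      have hfun : ∀ x, (s ++ [d]).contains x = (s.contains x || x == d) := by
        intro x
        by_cases hx : x = d <;> simp [List.contains_eq_mem, hx]
      rw [gmFilter_congr _ _ hfun rest, List.append_assoc, List.singleton_append]

theorem dedup_eq_gmFilter (free : List Int) :
    PySem.List.dedup free = gmFilter (fun _ => false) free := by
  have h := foldl_add_eq_gmFilter free []
  have h2 : PySem.List.dedup free = List.foldl PySem.Set.add [] free := by
    simp [PySem.List.dedup_eq_ofList, PySem.Set.ofList_eq_foldl]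
  rw [h2, h]
  simp only [List.nil_append]
  exact gmFilter_congr _ _ (by intro x; simp) free

-- filtering a gmFilter by a further membership predicate merges the predicates
theorem filter_gmFilter (free : List Int) :
    ∀ (m0 m : Int → Bool),
      (gmFilter m0 free).filter (fun d => !(m d)) = gmFilter (fun x => m0 x || m x) free := by
  induction free with
  | nil => intro m0 m; simp [gmFilter]
  | cons d rest ih =>
    intro m0 m
    simp only [gmFilter]
    by_cases h0 : m0 d = true
    · rw [if_pos h0, if_pos (by rw [h0]; rfl)]
      exact ih m0 m
    · rw [if_neg h0]
      by_cases hm : m d = true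
      · rw [if_pos (by simp [hm]), List.filter_cons_of_neg (by simp [hm])]
        rw [ih (fun x => m0 x || x == d) m]
        exact gmFilter_congr _ _ (by
          intro x
          by_cases hx : x = d
          · subst hx; simp [hm]
          · have hxd : (x == d) = false := by simp [hx]
            simp [hxd]) rest
      · rw [if_neg (by simp [h0, hm]), List.filter_cons_of_pos (by simp [hm])]
        rw [ih (fun x => m0 x || x == d) m]
        congr 1
        exact gmFilter_congr _ _ (by
          intro x
          by_cases hx : x = d
          · subst hx; simp
          · have hxd : (x == d) = false := by simp [hx]
            simp [hxd]) rest

-- ===== VERDICT (by name: the statement is the Claim_ definition above) =====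
theorem merge_boolean_and_free_spec : Claim_equal_merge_boolean_and_free := by
  intro boolean_ids free_ids B T _
  unfold Spec_merge_boolean_and_free merge_boolean_and_free merge_boolean_and_free_alt
  set top_bool := PySem.List.slice boolean_ids none (some B) with htb
  by_cases hT : T ≤ (top_bool.length : Int)
  · simp [hT]
  · simp only [hT, if_false]
    have hlt : (top_bool.length : Int) < T := by omega
    rw [mergeLoopA_eq T free_ids top_bool (PySem.Set.ofList top_bool) hlt]
    congr 1
    have hslice : PySem.List.slice
        ((PySem.List.dedup free_ids).filter
          (fun d => !(PySem.Set.contains (PySem.Set.ofList top_bool) d)))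
        none (some (T - (top_bool.length : Int))) =
        ((PySem.List.dedup free_ids).filter
          (fun d => !(PySem.Set.contains (PySem.Set.ofList top_bool) d))).take
          (T - (top_bool.length : Int)).toNat :=
      PySem.List.slice_to _ (by omega)
    rw [hslice]
    congr 1
    rw [dedup_eq_gmFilter,
        filter_gmFilter free_ids (fun _ => false) (fun d => PySem.Set.contains (PySem.Set.ofList top_bool) d)]
    exact gmFilter_congr _ _ (by intro x; simp) free_ids
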